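-- pv_equiv track=rewrite | github.com/xchdtk/Algorism | 2020 01.26/더 맵게.py | solution
-- ===== SOURCE A (Python) =====
-- import heapq
--
-- def solution(scoville,k):
--     heapq.heapify(scoville)
--     count = 0
--     while len(scoville) >= 2 and scoville[0] < k:
--         heap_1 = heapq.heappop(scoville)
--         heap_2 = heapq.heappop(scoville)
--         heapq.heappush(scoville,heap_1+(heap_2*2))
--         count = count + 1
--
--     if scoville[0] >= k:
--         return count
--     else:
--         return -1
-- ===== SOURCE B (Python) =====
-- def _insert(srt, x):
--     # insert x into the sorted list srt at its sorted position
--     i = 0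
--     while i < len(srt) and srt[i] < x:
--         i += 1
--     srt.insert(i, x)
--
--
-- def solution(scoville, k):
--     srt = sorted(scoville)
--     count = 0
--     while len(srt) >= 2 and srt[0] < k:
--         a = srt.pop(0)
--         b = srt.pop(0)
--         _insert(srt, a + b * 2)
--         count += 1
--     if srt[0] >= k:
--         return count
--     else:
--         return -1
-- ===== Notes on version B (the rewrite author's own statement) =====
-- stated objective: alternative
-- what changed: Replaces the binary min-heap (heapq) with a sorted list kept in order: sort once, always combine the two head elements, and re-insert the mix at its sorted position by a linear scan.
import Mathlib
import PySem

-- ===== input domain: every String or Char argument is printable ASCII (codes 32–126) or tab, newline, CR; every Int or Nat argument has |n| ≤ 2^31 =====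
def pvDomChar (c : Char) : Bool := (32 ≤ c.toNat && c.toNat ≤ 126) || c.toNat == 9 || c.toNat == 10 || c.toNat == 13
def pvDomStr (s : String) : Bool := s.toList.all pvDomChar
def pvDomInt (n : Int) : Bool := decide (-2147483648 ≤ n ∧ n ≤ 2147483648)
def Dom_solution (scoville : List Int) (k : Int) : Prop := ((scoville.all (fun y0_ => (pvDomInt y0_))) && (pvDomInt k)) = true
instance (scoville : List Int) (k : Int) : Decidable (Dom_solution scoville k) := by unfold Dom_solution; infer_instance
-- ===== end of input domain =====

-- B replaces A's binary min-heap (heapq) with a sorted list: sort once, combine the two head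
-- elements, re-insert the mix at its sorted position (objective: alternative data structure).
-- A turns the caller's list into a heap in place; B leaves it untouched — the equivalence proved
-- here is about the RETURN value only.

-- ===== PORT A =====
-- heapq on a list of Ints is ported by its exact value semantics on the element multiset:
-- after heapify the heap holds the same elements and its root scoville[0] is the minimum;
-- heappop returns the minimum and removes one occurrence of it; heappush adds its argument.
-- Elements are Ints, so equal-value ties make the choice of occurrence immaterial to the result.

-- scoville[0] of a heap = its minimum (0 unreachable: only read on a nonempty heap inside Pre_)
def heapPeek (h : List Int) : Int := (PySem.List.min? h (fun x => x)).getD 0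

-- heapq.heappop: return the minimum, remove one occurrence of it
def heapPop (h : List Int) : Int × List Int :=
  match PySem.List.min? h (fun x => x) with
  | some m => (m, h.erase m)
  | none => (0, h)

-- heapq.heappush: add x to the heap's elements
def heapPush (h : List Int) (x : Int) : List Int := h ++ [x]

-- used by aLoop's decreasing_by
theorem heapPop_length (h : List Int) (hne : h ≠ []) :
    (heapPop h).2.length + 1 = h.length := by
  rcases hm : PySem.List.min? h (fun x => x) with _ | m
  · exact absurd ((PySem.List.min?_eq_none_iff h _).mp hm) hne
  · have hmem := PySem.List.min?_mem hm
    have hpos := List.length_pos_of_mem hmem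
    simp only [heapPop, hm]
    rw [List.length_erase_of_mem hmem]
    omega

-- while len(scoville) >= 2 and scoville[0] < k: pop two, push heap_1 + heap_2*2, count += 1
def aLoop (h : List Int) (k count : Int) : Int :=
  if hl : 2 ≤ h.length ∧ heapPeek h < k then
    aLoop (heapPush (heapPop (heapPop h).2).2
            ((heapPop h).1 + (heapPop (heapPop h).2).1 * 2)) k (count + 1)
  else
    if heapPeek h ≥ k then count else -1
termination_by h.length
decreasing_by
  have h1 : h ≠ [] := by intro he; subst he; simp at hl
  have e1 := heapPop_length h h1
  have h2 : (heapPop h).2 ≠ [] := by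
    intro he
    rw [he] at e1
    simp only [List.length_nil] at e1
    omega
  have e2 := heapPop_length _ h2
  simp [heapPush]
  omega

def solution (scoville : List Int) (k : Int) : Int :=
  -- heapq.heapify rearranges scoville in place; its element multiset is unchanged
  aLoop scoville k 0

-- ===== PORT B =====
-- _insert(srt, x): scan past the elements < x, insert x there (srt stays sorted)
def bInsert (srt : List Int) (x : Int) : List Int :=
  match srt with
  | [] => [x]
  | y :: ys => if y < x then y :: bInsert ys x else x :: y :: ys

-- used by bLoop's decreasing_by
theorem bInsert_length (srt : List Int) (x : Int) :
    (bInsert srt x).length = srt.length + 1 := by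
  induction srt with
  | nil => simp [bInsert]
  | cons y ys ih => simp only [bInsert]; split <;> simp [ih]

-- while len(srt) >= 2 and srt[0] < k: a, b = two pops at 0; _insert(srt, a + b*2); count += 1
def bLoop : List Int → Int → Int → Int
  | a :: b :: rest, k, count =>
      if a < k then bLoop (bInsert rest (a + b * 2)) k (count + 1)
      else if a ≥ k then count else -1
  | srt, k, count => if srt.headD 0 ≥ k then count else -1
termination_by srt => srt.length
decreasing_by simp [bInsert_length]

def solution_alt (scoville : List Int) (k : Int) : Int :=
  bLoop (PySem.List.sorted scoville (fun x => x)) k 0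

-- ===== PRECONDITION & SPEC =====
-- Pre_ excludes only the empty list, on which A raises IndexError at the final scoville[0] read.
def Pre_solution (scoville : List Int) (k : Int) : Prop := scoville ≠ []
instance (scoville : List Int) (k : Int) : Decidable (Pre_solution scoville k) := by
  unfold Pre_solution; infer_instance

def pvWitness_solution : List Int × Int := ([1, 2, 3, 9, 10, 12], 7)

def Spec_solution (scoville : List Int) (k : Int) (out : Int) : Prop := out = solution_alt scoville k
instance (scoville : List Int) (k : Int) (out : Int) : Decidable (Spec_solution scoville k out) := by unfold Spec_solution; infer_instance

-- ===== CLAIM (what is proved, stated in full; the proofs are below) =====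
def Claim_equal_solution : Prop := ∀ (scoville : List Int) (k : Int), Dom_solution scoville k → Pre_solution scoville k → Spec_solution scoville k (solution scoville k)

-- ===== LEMMAS AND PROOFS =====

-- the minimum of any list that is a permutation of the sorted list a :: t is a
theorem min?_of_perm_sorted (h : List Int) (a : Int) (t : List Int)
    (hp : h.Perm (a :: t)) (hs : (a :: t).Pairwise (· ≤ ·)) :
    PySem.List.min? h (fun x => x) = some a := by
  rcases hm : PySem.List.min? h (fun x => x) with _ | m
  · have : h = [] := (PySem.List.min?_eq_none_iff h _).mp hm
    subst this
    exact absurd hp.symm.length_eq (by simp)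
  · have hmem : m ∈ (a :: t) := hp.mem_iff.mp (PySem.List.min?_mem hm)
    have ham : a ≤ m := by
      rcases List.mem_cons.mp hmem with hmem | hmem
      · simp [hmem]
      · exact (List.pairwise_cons.mp hs).1 m hmem
    have hma : m ≤ a :=
      PySem.List.min?_isMin hm a (hp.mem_iff.mpr (List.mem_cons_self))
    simp [le_antisymm hma ham]

theorem heapPop_of_perm_sorted (h : List Int) (a : Int) (t : List Int)
    (hp : h.Perm (a :: t)) (hs : (a :: t).Pairwise (· ≤ ·)) :
    (heapPop h).1 = a ∧ (heapPop h).2.Perm t := by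
  have hmin := min?_of_perm_sorted h a t hp hs
  refine ⟨by simp [heapPop, hmin], ?_⟩
  have := hp.erase a
  simpa [heapPop, hmin, List.erase_cons_head] using this

theorem bInsert_perm (srt : List Int) (x : Int) : (bInsert srt x).Perm (x :: srt) := by
  induction srt with
  | nil => simp [bInsert]
  | cons y ys ih =>
      simp only [bInsert]
      split
      · exact (ih.cons y).trans (List.Perm.swap x y ys)
      · exact List.Perm.refl _

theorem bInsert_pairwise (srt : List Int) (x : Int) (hs : srt.Pairwise (· ≤ ·)) :
    (bInsert srt x).Pairwise (· ≤ ·) := by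
  induction srt with
  | nil => simp [bInsert]
  | cons y ys ih =>
      rcases List.pairwise_cons.mp hs with ⟨hy, hys⟩
      simp only [bInsert]
      split
      · rename_i hlt
        refine List.pairwise_cons.mpr ⟨?_, ih hys⟩
        intro z hz
        rcases List.mem_cons.mp ((bInsert_perm ys x).mem_iff.mp hz) with hz | hz
        · subst hz; exact le_of_lt hlt
        · exact hy z hz
      · rename_i hnlt
        refine List.pairwise_cons.mpr ⟨?_, hs⟩
        intro z hz
        rcases List.mem_cons.mp hz with hz | hz
        · subst hz; exact le_of_not_gt hnlt
        · exact le_trans (le_of_not_gt hnlt) (hy z hz)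

-- main coupling: A's heap is always a permutation of B's sorted list
theorem loop_eq : ∀ (n : Nat) (s h : List Int) (k c : Int), s.length ≤ n →
    h.Perm s → s.Pairwise (· ≤ ·) → aLoop h k c = bLoop s k c := by
  intro n
  induction n with
  | zero =>
      intro s h k c hn hp _
      have hs : s = [] := List.eq_nil_of_length_eq_zero (by omega)
      subst hs
      have hh : h = [] := List.eq_nil_of_length_eq_zero (by simpa using hp.length_eq)
      subst hh
      rw [aLoop]
      simp [bLoop, heapPeek, PySem.List.min?]
  | succ n ih =>
      intro s h k c hn hp hs
      match s with
      | [] =>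
          have hh : h = [] := List.eq_nil_of_length_eq_zero (by simpa using hp.length_eq)
          subst hh
          rw [aLoop]
          simp [bLoop, heapPeek, PySem.List.min?]
      | [a] =>
          have hpk : heapPeek h = a := by
            simp [heapPeek, min?_of_perm_sorted h a [] hp hs]
          have hlen : h.length = 1 := by simpa using hp.length_eq
          have hguard : ¬ (2 ≤ h.length ∧ heapPeek h < k) := by
            intro ⟨h2, _⟩; omega
          rw [aLoop, dif_neg hguard]
          simp [hpk, bLoop]
      | a :: b :: rest =>
          have hpk : heapPeek h = a := by
            simp [heapPeek, min?_of_perm_sorted h a (b :: rest) hp hs]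
          have hlen : h.length = rest.length + 2 := by simpa using hp.length_eq
          obtain ⟨hpop1, hperm1⟩ := heapPop_of_perm_sorted h a (b :: rest) hp hs
          have hs2 : (b :: rest).Pairwise (· ≤ ·) := (List.pairwise_cons.mp hs).2
          obtain ⟨hpop2, hperm2⟩ := heapPop_of_perm_sorted (heapPop h).2 b rest hperm1 hs2
          by_cases hak : a < k
          · rw [aLoop]
            have hguard : 2 ≤ h.length ∧ heapPeek h < k := ⟨by omega, by rw [hpk]; exact hak⟩
            rw [dif_pos hguard]
            rw [show bLoop (a :: b :: rest) k c
                  = bLoop (bInsert rest (a + b * 2)) k (c + 1) by rw [bLoop]; simp [hak]]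
            rw [hpop1, hpop2]
            refine ih (bInsert rest (a + b * 2)) _ k (c + 1) ?_ ?_ ?_
            · rw [bInsert_length]; simpa using hn
            · exact ((List.perm_append_singleton _ _).trans
                (hperm2.cons _)).trans (bInsert_perm rest (a + b * 2)).symm
            · exact bInsert_pairwise rest (a + b * 2) (List.pairwise_cons.mp hs2).2
          · rw [aLoop]
            have hguard : ¬ (2 ≤ h.length ∧ heapPeek h < k) := by
              intro ⟨_, hlt⟩; rw [hpk] at hlt; exact hak hlt
            rw [dif_neg hguard]
            rw [show bLoop (a :: b :: rest) k c = if a < k then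
                  bLoop (bInsert rest (a + b * 2)) k (c + 1)
                  else if a ≥ k then c else -1 from by rw [bLoop]]
            simp [hpk, hak, le_of_not_gt hak]

-- ===== VERDICT (by name: the statement is the Claim_ definition above) =====
theorem solution_spec : Claim_equal_solution := by
  intro scoville k _ _
  unfold Spec_solution solution solution_alt
  exact loop_eq (PySem.List.sorted scoville (fun x => x)).length
    (PySem.List.sorted scoville (fun x => x)) scoville k 0 le_rfl
    (PySem.List.sorted_perm scoville (fun x => x) false).symm
    (PySem.List.sorted_pairwise scoville (fun x => x))
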